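-- pv_equiv track=rewrite | github.com/pypi-data/pypi-mirror-79 | packages/sout/sout-0.0.0-py3-none-any.whl/sout/__init__.py | one_line
-- ===== SOURCE A (Python) =====
-- def one_line(show_str, limit_n):
-- 	# 改行やタブを省略してみる
-- 	rep_str = show_str
-- 	for sep in ["\n", "\t"]:
-- 		rep_str = rep_str.replace(sep, " ")
-- 	ls = rep_str.split(" ")
-- 	ls = [e for e in ls if len(e) > 0]
-- 	short_s = " ".join(ls)
-- 	# 文字長判断
-- 	if len(short_s) > limit_n:
-- 		return show_str
-- 	else:
-- 		return short_s
-- ===== SOURCE B (Python) =====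
-- def one_line(show_str, limit_n):
-- 	# single left-to-right scan: skip leading/trailing runs of space/newline/tab,
-- 	# emit exactly one space between tokens; then the same length check as A
-- 	out = []
-- 	pending = False
-- 	for c in show_str:
-- 		if c in " \n\t":
-- 			if out:
-- 				pending = True
-- 		else:
-- 			if pending:
-- 				out.append(" ")
-- 				pending = False
-- 			out.append(c)
-- 	short_s = "".join(out)
-- 	if len(short_s) > limit_n:
-- 		return show_str
-- 	else:
-- 		return short_s
-- ===== Notes on version B (the rewrite author's own statement) =====
-- stated objective: alternative
-- what changed: Replaces A's replace-loop + split + filter + join pipeline (four passes building intermediate lists) with a single left-to-right stateful scan that collapses runs of space/newline/tab while skipping leading and trailing whitespace.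
import Mathlib
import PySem

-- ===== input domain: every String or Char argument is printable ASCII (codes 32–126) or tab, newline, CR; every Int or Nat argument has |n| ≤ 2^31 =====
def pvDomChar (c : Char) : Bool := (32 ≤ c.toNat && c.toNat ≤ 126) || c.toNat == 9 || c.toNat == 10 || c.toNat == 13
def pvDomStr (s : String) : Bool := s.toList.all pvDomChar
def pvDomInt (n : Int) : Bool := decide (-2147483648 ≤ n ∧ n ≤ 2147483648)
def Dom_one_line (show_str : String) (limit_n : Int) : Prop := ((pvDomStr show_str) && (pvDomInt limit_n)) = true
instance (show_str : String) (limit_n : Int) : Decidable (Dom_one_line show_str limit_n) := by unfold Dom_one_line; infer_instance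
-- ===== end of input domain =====

-- B replaces A's replace-loop + split + filter + join pipeline by one streaming stateful scan; objective: alternative (same O(n) cost).

-- ===== PORT A =====
def one_line (show_str : String) (limit_n : Int) : String :=
  let rep_str := ["\n", "\t"].foldl (fun r sep => PySem.Str.replace r sep " ") show_str
  -- rep_str.split(" "): sep is nonempty, so split? is always `some`; getD [] is unreachable
  let ls := (PySem.Str.split? rep_str " ").getD []
  let ls2 := ls.filter (fun e => 0 < PySem.Str.len e)
  let short_s := PySem.Str.join " " ls2
  if limit_n < PySem.Str.len short_s then show_str else short_s

-- ===== PORT B =====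
-- `c in " \n\t"`
def olWs (c : Char) : Bool := c == ' ' || c == '\n' || c == '\t'

-- one step of B's scan: state = (characters emitted so far, pending-space flag)
def olStep (st : List Char × Bool) (c : Char) : List Char × Bool :=
  if olWs c then
    (st.1, if st.1.isEmpty then st.2 else true)
  else
    ((if st.2 then st.1 ++ [' '] else st.1) ++ [c], false)

def one_line_alt (show_str : String) (limit_n : Int) : String :=
  let st := show_str.toList.foldl olStep ([], false)
  let short_s := String.ofList st.1
  if limit_n < PySem.Str.len short_s then show_str else short_s

-- ===== PRECONDITION & SPEC =====
def Spec_one_line (show_str : String) (limit_n : Int) (out : String) : Prop := out = one_line_alt show_str limit_n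
instance (show_str : String) (limit_n : Int) (out : String) : Decidable (Spec_one_line show_str limit_n out) := by unfold Spec_one_line; infer_instance

-- ===== CLAIM (what is proved, stated in full; the proofs are below) =====
def Claim_equal_one_line : Prop := ∀ (show_str : String) (limit_n : Int), Dom_one_line show_str limit_n → Spec_one_line show_str limit_n (one_line show_str limit_n)

-- ===== LEMMAS AND PROOFS =====

-- collapse '\n'/'\t' to ' ' (what A's two replaces do, pointwise)
def olF (c : Char) : Char := if olWs c then ' ' else c

-- structural version of PySem.Chars.splitOn.go for the single-char separator ' '
def splitOn1 : List Char → List Char → List (List Char)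
  | [], cur => [cur.reverse]
  | c :: t, cur => if c = ' ' then cur.reverse :: splitOn1 t [] else splitOn1 t (c :: cur)

-- filter-nonempty then join with ' ' (the tail of A's pipeline)
def olJf (ts : List (List Char)) : List Char :=
  PySem.Chars.join [' '] (ts.filter (fun e => !e.isEmpty))

-- what B's scan appends after state (e = out nonempty, p = pending)
def olRest : List Char → Bool → Bool → List Char
  | [], _, _ => []
  | c :: t, e, p =>
      if olWs c then olRest t e (e || p)
      else (if p then [' '] else []) ++ c :: olRest t true false

theorem replace_go_single (o : Char) (nw : List Char) :
    ∀ (l : List Char) (fuel : Nat), l.length ≤ fuel → ∀ acc,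
      PySem.Chars.replace.go [o] nw fuel l acc
        = acc.reverse ++ l.flatMap (fun c => if c = o then nw else [c]) := by
  intro l
  induction l with
  | nil => intro fuel _ acc; cases fuel <;> simp [PySem.Chars.replace.go]
  | cons c t ih =>
    intro fuel hf acc
    cases fuel with
    | zero => simp at hf
    | succ fuel =>
      simp only [PySem.Chars.replace.go, List.isPrefixOf, List.flatMap_cons]
      by_cases hc : o = c
      · subst hc
        simp only [BEq.rfl, Bool.true_and, if_pos, List.length_cons,
          List.drop_succ_cons, List.length_nil, List.drop_zero]
        rw [ih fuel (by simpa using hf) (nw.reverse ++ acc)]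
        simp
      · have : (o == c) = false := by simpa using hc
        simp only [this, Bool.false_and, Bool.false_eq_true, if_false]
        rw [ih fuel (by simpa using hf) (c :: acc)]
        simp [Ne.symm hc]

theorem replace_single (s : List Char) (o : Char) (nw : List Char) :
    PySem.Chars.replace s [o] nw = s.flatMap (fun c => if c = o then nw else [c]) := by
  simpa using replace_go_single o nw s s.length le_rfl []

theorem splitOn_go_single :
    ∀ (l : List Char) (fuel : Nat), l.length ≤ fuel → ∀ cur acc,
      PySem.Chars.splitOn.go [' '] fuel l cur acc
        = acc.reverse ++ splitOn1 l cur := by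
  intro l
  induction l with
  | nil => intro fuel _ cur acc; cases fuel <;> simp [PySem.Chars.splitOn.go, splitOn1]
  | cons c t ih =>
    intro fuel hf cur acc
    cases fuel with
    | zero => simp at hf
    | succ fuel =>
      simp only [PySem.Chars.splitOn.go, List.isPrefixOf, splitOn1]
      by_cases hc : c = ' '
      · subst hc
        simp only [BEq.rfl, Bool.true_and, if_pos, List.length_cons,
          List.drop_succ_cons, List.length_nil, List.drop_zero]
        rw [ih fuel (by simpa using hf) [] (cur.reverse :: acc)]
        simp
      · have : (' ' == c) = false := by simpa using fun h => hc h.symm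
        simp only [this, Bool.false_and, Bool.false_eq_true, if_false, hc]
        rw [ih fuel (by simpa using hf) (c :: cur) acc]

theorem splitOn_single (s : List Char) :
    PySem.Chars.splitOn s [' '] = splitOn1 s [] := by
  simpa using splitOn_go_single s (s.length + 1) (by omega) [] []

theorem olJf_singleton (x : List Char) : olJf [x] = x := by
  by_cases h : x = [] <;> simp [olJf, PySem.Chars.join, List.intercalate, h]

theorem olJf_eq_nil_iff (ts : List (List Char)) :
    olJf ts = [] ↔ ts.filter (fun e => !e.isEmpty) = [] := by
  unfold olJf
  cases h : ts.filter (fun e => !e.isEmpty) with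
  | nil => simp [PySem.Chars.join, List.intercalate]
  | cons a l =>
    have ha : a ∈ ts.filter (fun e => !e.isEmpty) := by simp [h]
    have ha' : a ≠ [] := by
      have := List.of_mem_filter ha
      simpa using this
    simp only [List.cons_ne_nil, iff_false]
    intro hj
    cases l with
    | nil =>
      simp [PySem.Chars.join, List.intercalate] at hj
      exact ha' hj
    | cons b l' =>
      cases a with
      | nil => exact ha' rfl
      | cons a0 a' => simp [PySem.Chars.join, List.intercalate] at hj

theorem olJf_cons (x : List Char) (ts : List (List Char)) :
    olJf (x :: ts) =
      if x.isEmpty then olJf ts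
      else x ++ (if (olJf ts).isEmpty then [] else ' ' :: olJf ts) := by
  by_cases hx : x = []
  · simp [olJf, hx]
  · have hx' : x.isEmpty = false := by simpa using hx
    simp only [hx', Bool.false_eq_true, if_false]
    by_cases ht : olJf ts = []
    · have hfil := (olJf_eq_nil_iff ts).1 ht
      have ht' : (olJf ts).isEmpty = true := by simpa using ht
      simp [olJf, hx', hfil, PySem.Chars.join, List.intercalate, ht']
    · have hfil : ts.filter (fun e => !e.isEmpty) ≠ [] := by
        intro h; exact ht ((olJf_eq_nil_iff ts).2 h)
      have ht' : (olJf ts).isEmpty = false := by simpa using ht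
      simp only [ht', Bool.false_eq_true, if_false]
      unfold olJf
      cases h : ts.filter (fun e => !e.isEmpty) with
      | nil => exact absurd h hfil
      | cons b l =>
        simp [hx', h, PySem.Chars.join, List.intercalate]

theorem olRest_pend (t : List Char) :
    olRest t true true =
      if (olRest t false false).isEmpty then [] else ' ' :: olRest t false false := by
  induction t with
  | nil => simp [olRest]
  | cons c t ih =>
    by_cases hc : olWs c = true
    · simpa [olRest, hc] using ih
    · simp [olRest, hc]

theorem splitOn1_map_rest (cs : List Char) :
    ∀ cur, olJf (splitOn1 (cs.map olF) cur) = cur.reverse ++ olRest cs (!cur.isEmpty) false := by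
  induction cs with
  | nil => intro cur; simp [splitOn1, olRest, olJf_singleton]
  | cons c t ih =>
    intro cur
    by_cases hc : olWs c = true
    · have hf : olF c = ' ' := by simp [olF, hc]
      simp only [List.map_cons, hf, splitOn1, if_pos, olRest, hc, if_true]
      rw [olJf_cons]
      by_cases hcur : cur = []
      · subst hcur
        simpa using ih []
      · have h1 : cur.reverse.isEmpty = false := by simpa using hcur
        have h2 : (!cur.isEmpty) = true := by simpa using hcur
        simp only [h1, Bool.false_eq_true, if_false, h2, Bool.true_or]
        rw [ih [], olRest_pend]
        simp
    · have hf : olF c = c := by simp [olF, hc]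
      have hcs : ¬ c = ' ' := by
        intro h; subst h; simp [olWs] at hc
      simp only [List.map_cons, hf, splitOn1, hcs, if_false, olRest, hc, Bool.false_eq_true,
        List.append_nil]
      rw [ih (c :: cur)]
      simp

theorem foldl_olStep (cs : List Char) :
    ∀ (out : List Char) (p : Bool), (p = true → out ≠ []) →
      (cs.foldl olStep (out, p)).1 = out ++ olRest cs (!out.isEmpty) p := by
  induction cs with
  | nil => intro out p _; simp [olRest]
  | cons c t ih =>
    intro out p hp
    by_cases hc : olWs c = true
    · have hstep : olStep (out, p) c = (out, !out.isEmpty || p) := by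
        by_cases ho : out = [] <;> simp [olStep, hc, ho]
      simp only [List.foldl_cons, hstep, olRest, hc, if_true]
      exact ih out (!out.isEmpty || p) (by
        intro h
        rcases Bool.or_eq_true_iff.1 h with h1 | h1
        · simpa using h1
        · exact hp h1)
    · have hstep : olStep (out, p) c = ((if p then out ++ [' '] else out) ++ [c], false) := by
        simp [olStep, hc]
      simp only [List.foldl_cons, hstep, olRest, hc, Bool.false_eq_true, if_false]
      rw [ih _ false (by simp)]
      have : (!((if p then out ++ [' '] else out) ++ [c]).isEmpty) = true := by
        by_cases p = true <;> simp_all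
      rw [this]
      by_cases hpp : p = true <;> simp [hpp]

-- A's collapsed string equals B's collapsed string, at the character-list level
theorem short_eq (cs : List Char) :
    olJf (splitOn1 (cs.flatMap (fun c => if c = '\n' then [' '] else [c])
        |>.flatMap (fun c => if c = '\t' then [' '] else [c])) [])
      = (cs.foldl olStep ([], false)).1 := by
  have hmap : (cs.flatMap (fun c => if c = '\n' then [' '] else [c])
      |>.flatMap (fun c => if c = '\t' then [' '] else [c])) = cs.map olF := by
    induction cs with
    | nil => rfl
    | cons c t iht =>
      simp only [List.flatMap_cons, List.map_cons, List.flatMap_append]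
      rw [iht]
      by_cases h1 : c = '\n'
      · subst h1; rfl
      · by_cases h2 : c = '\t'
        · subst h2; rfl
        · by_cases h3 : c = ' '
          · subst h3; rfl
          · have hw : olWs c = false := by
              simp [olWs, h1, h2, h3]
            simp [h1, h2, olF, hw]
  rw [hmap, splitOn1_map_rest cs [], foldl_olStep cs [] false (by simp)]
  simp

-- ===== VERDICT (by name: the statement is the Claim_ definition above) =====
theorem one_line_spec : Claim_equal_one_line := by
  intro show_str limit_n _
  unfold Spec_one_line one_line one_line_alt
  have e1 : ("\n" : String).toList = ['\n'] := rfl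
  have e2 : ("\t" : String).toList = ['\t'] := rfl
  have e3 : (" " : String).toList = [' '] := rfl
  have hshort :
      PySem.Str.join " " (((PySem.Str.split?
          (["\n", "\t"].foldl (fun r sep => PySem.Str.replace r sep " ") show_str) " ").getD []).filter
            (fun e => 0 < PySem.Str.len e))
        = String.ofList (show_str.toList.foldl olStep ([], false)).1 := by
    simp only [List.foldl_cons, List.foldl_nil, PySem.Str.split?, PySem.Str.replace,
      PySem.Chars.split?, String.toList_ofList, PySem.Str.join, e1, e2, e3]
    rw [replace_single, replace_single]
    simp only [List.isEmpty_cons, Bool.false_eq_true, if_false, Option.map_some, Option.getD_some,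
      List.filter_map, List.map_map]
    rw [splitOn_single]
    rw [← short_eq show_str.toList]
    have hpred : ((fun e => decide (0 < PySem.Str.len e)) ∘ String.ofList) = (fun e : List Char => !e.isEmpty) := by
      funext e
      cases e <;> simp [PySem.Str.len]
    rw [hpred]
    congr 1
    unfold olJf
    congr 1
    simp [Function.comp_def]
  simp only []
  rw [hshort]
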